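-- pv_equiv track=rewrite | github.com/Dorijan-Cirkveni/diplomski-rad | util/struct/TupleDotOperations.py | T_generate_links
-- ===== SOURCE A (Python) =====
-- def Toper(T1:tuple, T2:tuple, oper, forceInteger):
--     if len(T1) != len(T2):
--         raise Exception("Bad length:{}!={}".format(T1, T2))
--     X = []
--     for i in range(len(T2)):
--         X.append(oper(T1[i], T2[i]))
--     if forceInteger:
--         X=[int(e) for e in X]
--     return tuple(X)
--
-- def Tadd(T1, T2, forceInteger=False):
--     return Toper(T1, T2, lambda A, B: A + B, forceInteger)
--
-- def T_generate_links(objectset: set, moves: list, direction, passiveEntityLimit=1):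
--     nex = dict()
--     starters = set()
--     active = set(moves)
--     while moves:
--         E = moves.pop()
--         if len(E)!=len(direction):
--             raise Exception("Bad length: {}!={}".format(E,direction))
--         if E not in objectset:
--             continue
--         F = Tadd(E, direction)
--         starters ^= {E}
--         starters ^= {F}
--         nex[E] = F
--         moves.append(F)
--         objectset.remove(E)
--     M = []
--     for E in starters:
--         if E not in nex:
--             continue
--         L = []
--         F = E
--         while F is not None:
--             L.append(F)
--             F = nex.get(F, None)
--         M.append(L)
--     if passiveEntityLimit == -1:
--         return M
--     M2 = []
--     for L in M:
--         L2 = []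
--         last = L.pop()
--         passiveCount = 0
--         for e in L:
--             if e in active:
--                 passiveCount = 0
--             else:
--                 passiveCount += 1
--             if passiveCount > passiveEntityLimit:
--                 L2 = []
--             else:
--                 L2.append(e)
--         if L2:
--             L2.append(last)
--             M2.append(L2)
--     return M2
-- ===== SOURCE B (Python) =====
-- def T_generate_links(objectset: set, moves: list, direction, passiveEntityLimit=1):
--     # Same return value as the original; unlike it, it does not consume `moves`.
--     nex = dict()
--     starters = set()
--     active = set(moves)
--     for E in reversed(moves):
--         while True:
--             if len(E) != len(direction):
--                 raise Exception("Bad length: {}!={}".format(E, direction))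
--             if E not in objectset:
--                 break
--             F = tuple(a + b for a, b in zip(E, direction))
--             starters ^= {E}
--             starters ^= {F}
--             nex[E] = F
--             objectset.remove(E)
--             E = F
--     M2 = []
--     for E in starters:
--         if E not in nex:
--             continue
--         L = [E]
--         while L[-1] in nex:
--             L.append(nex[L[-1]])
--         if passiveEntityLimit == -1:
--             M2.append(L)
--             continue
--         body = L[:-1]
--         cut = 0
--         run = 0
--         for i, e in enumerate(body):
--             run = 0 if e in active else run + 1
--             if run > passiveEntityLimit:
--                 cut = i + 1
--         if cut < len(body):
--             M2.append(body[cut:] + [L[-1]])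
--     return M2
-- ===== Notes on version B (the rewrite author's own statement) =====
-- stated objective: simpler
-- what changed: B drops A's mutable pop/append work-stack and the build-M-then-refilter second phase: it walks each chain directly with a for-over-reversed(moves) loop, and filters each chain in one enumerate pass that computes a cut index instead of repeatedly resetting an accumulator list; the XOR-toggled starters set and nex dict are kept so the returned chain order (CPython set iteration order) is identical.
import Mathlib
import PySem

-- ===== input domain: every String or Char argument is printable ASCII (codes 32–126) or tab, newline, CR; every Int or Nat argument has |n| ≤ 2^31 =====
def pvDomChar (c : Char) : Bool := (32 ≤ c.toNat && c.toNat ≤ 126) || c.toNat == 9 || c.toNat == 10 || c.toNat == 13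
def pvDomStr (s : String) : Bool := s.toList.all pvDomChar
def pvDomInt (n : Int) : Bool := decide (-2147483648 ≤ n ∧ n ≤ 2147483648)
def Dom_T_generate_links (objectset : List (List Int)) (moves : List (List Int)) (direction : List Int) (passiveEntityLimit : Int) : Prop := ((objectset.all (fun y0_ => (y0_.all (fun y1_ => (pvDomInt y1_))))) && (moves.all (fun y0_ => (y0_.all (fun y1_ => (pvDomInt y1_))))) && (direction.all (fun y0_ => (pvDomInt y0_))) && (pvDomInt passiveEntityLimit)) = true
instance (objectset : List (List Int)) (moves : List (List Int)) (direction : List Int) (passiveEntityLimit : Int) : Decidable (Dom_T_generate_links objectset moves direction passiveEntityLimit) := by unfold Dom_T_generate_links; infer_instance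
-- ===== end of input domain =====

-- B replaces A's pop/append work-stack by a direct `for E in reversed(moves)` chain walk and
-- replaces the rebuild-M-then-refilter pass by one pass that computes a cut index per chain.
-- Both programs iterate the Python set `starters`, whose order is CPython's hash-table order:
-- the shared pv* helpers below model CPython's set table (xxHash tuple hash, open addressing,
-- LINEAR_PROBES=9, dummy slots, resize) exactly, so that order is ported faithfully.
-- A empties `moves` and drains `objectset` in place; B mutates only `objectset` (return values agree).

-- ===== SHARED HELPERS: CPython tuple hash and set table (used identically by both ports) =====
def pvHashInt (i : Int) : UInt64 :=
  let j : Int := if i = -1 then -2 else i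
  UInt64.ofNat (j.emod 18446744073709551616).toNat

def pvRotl31 (x : UInt64) : UInt64 := (x <<< 31) ||| (x >>> 33)

def pvHashTuple (xs : List Int) : UInt64 :=
  let acc := xs.foldl
    (fun a it => (pvRotl31 (a + pvHashInt it * 14029467366897019727)) * 11400714785074694791)
    2870177450012600261
  let acc := acc + ((UInt64.ofNat xs.length) ^^^ 2870177450013471926)
  if acc = 18446744073709551615 then 1546275796 else acc

inductive PvEnt
  | unused
  | dummy
  | act (h : UInt64) (k : List Int)
deriving DecidableEq

-- the slots one probe round inspects: i, and i+1..i+9 when the linear window fits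
def pvProbeSlots (i mask : Nat) : List Nat :=
  if i + 9 ≤ mask then List.range' i 10 else [i]

-- scan one probe window: some (true, j) = key found active at j; some (false, j) = unused slot j;
-- second component tracks the latest dummy seen (CPython's freeslot)
def pvScanSlots (t : List PvEnt) (key : List Int) (h : UInt64) :
    List Nat → Option Nat → (Option (Bool × Nat)) × Option Nat
  | [], free => (none, free)
  | j :: js, free =>
    match t.getD j .unused with
    | .unused => (some (false, j), free)
    | .act h' k => if h' = h ∧ k = key then (some (true, j), free)
                   else pvScanSlots t key h js free
    | .dummy => pvScanSlots t key h js (some j)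

-- returns (foundActive, slot, insertIntoUnused); fuel is a totality guard only
def pvFindLoop (t : List PvEnt) (mask : Nat) (key : List Int) (h : UInt64) :
    Nat → UInt64 → Option Nat → Nat → (Bool × Nat × Bool)
  | _, _, _, 0 => (false, 0, false)
  | i, perturb, free, fuel + 1 =>
    match pvScanSlots t key h (pvProbeSlots i mask) free with
    | (some (true, j), _) => (true, j, false)
    | (some (false, j), free') =>
      match free' with
      | some f => (false, f, false)
      | none => (false, j, true)
    | (none, free') =>
      let p := perturb >>> 5
      pvFindLoop t mask key h ((i * 5 + 1 + p.toNat) % (mask + 1)) p free' fuel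

structure PvSet where
  table : List PvEnt
  mask : Nat
  fill : Nat
  used : Nat

def pvSetEmpty : PvSet := ⟨List.replicate 8 .unused, 7, 0, 0⟩

def pvCleanLoop (t : List PvEnt) (mask : Nat) : Nat → UInt64 → Nat → Nat
  | _, _, 0 => 0
  | i, perturb, fuel + 1 =>
    match (pvProbeSlots i mask).find? (fun j => t.getD j .unused = .unused) with
    | some j => j
    | none =>
      let p := perturb >>> 5
      pvCleanLoop t mask ((i * 5 + 1 + p.toNat) % (mask + 1)) p fuel

def pvGrow : Nat → Nat → Nat → Nat
  | n, _, 0 => n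
  | n, minused, fuel + 1 => if n ≤ minused then pvGrow (n * 2) minused fuel else n

def pvResize (s : PvSet) (minused : Nat) : PvSet :=
  let ns := pvGrow 8 minused 64
  let mask := ns - 1
  let t := s.table.foldl
    (fun t e => match e with
      | .act h k => t.set (pvCleanLoop t mask (h.toNat % (mask + 1)) h (mask + 65)) (.act h k)
      | _ => t)
    (List.replicate ns .unused)
  ⟨t, mask, s.used, s.used⟩

def pvSetAdd (s : PvSet) (key : List Int) (h : UInt64) : PvSet :=
  match pvFindLoop s.table s.mask key h (h.toNat % (s.mask + 1)) h none (s.mask + 65) with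
  | (true, _, _) => s
  | (false, j, intoUnused) =>
    let t := s.table.set j (.act h key)
    if intoUnused then
      let s' : PvSet := ⟨t, s.mask, s.fill + 1, s.used + 1⟩
      if s'.fill * 5 ≥ s.mask * 3 then
        pvResize s' (if s'.used > 50000 then s'.used * 2 else s'.used * 4)
      else s'
    else ⟨t, s.mask, s.fill, s.used + 1⟩

def pvSetToggle (s : PvSet) (key : List Int) : PvSet :=
  let h := pvHashTuple key
  match pvFindLoop s.table s.mask key h (h.toNat % (s.mask + 1)) h none (s.mask + 65) with
  | (true, j, _) => ⟨s.table.set j .dummy, s.mask, s.fill, s.used - 1⟩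
  | _ => pvSetAdd s key h

-- iteration order of a CPython set = active slots in table order
def pvSetItems (s : PvSet) : List (List Int) :=
  s.table.filterMap (fun e => match e with | .act _ k => some k | _ => none)

-- the loop state both programs thread: remaining objectset, the nex dict, the starters set
structure PvSt where
  objs : List (List Int)
  nex : PySem.Dict (List Int) (List Int)
  starters : PvSet

-- ===== PORT A =====
-- Toper/Tadd: index loop over range(len(T2)); at every call site both lists have equal length,
-- so getD-indexing is exact there
def pvToper (T1 T2 : List Int) : List Int :=
  (List.range T2.length).map (fun i => T1.getD i 0 + T2.getD i 0)

-- A's `while moves:` stack loop; `stack` is `moves` reversed, so pop()/append() act on the head.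
-- none = the `raise Exception("Bad length…")` (excluded by Pre_).
def pvALoop (dir : List Int) : List (List Int) → PvSt → Option PvSt
  | [], st => some st
  | E :: rest, st =>
    if E.length ≠ dir.length then none
    else if st.objs.contains E then
      let F := pvToper E dir
      pvALoop dir (F :: rest)
        ⟨st.objs.erase E, st.nex.insert E F, pvSetToggle (pvSetToggle st.starters E) F⟩
    else pvALoop dir rest st
termination_by stack st => stack.length + 2 * st.objs.length
decreasing_by
  · have : (st.objs.erase E).length = st.objs.length - 1 :=
      List.length_erase_of_mem (by simpa using ‹st.objs.contains E = true›)
    have h2 : 0 < st.objs.length :=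
      List.length_pos_of_mem (show E ∈ st.objs by simpa using ‹st.objs.contains E = true›)
    simp only [this, List.length_cons]; omega
  · simp only [List.length_cons]; omega

-- A's chain walk: `F = E; while F is not None: L.append(F); F = nex.get(F, None)`;
-- fuel (chain length bound) is a totality guard only
def pvChainA (nex : PySem.Dict (List Int) (List Int)) : Nat → Option (List Int) → List (List Int)
  | _, none => []
  | 0, some _ => []
  | fuel + 1, some F => F :: pvChainA nex fuel (nex.get? F)

def T_generate_links (objectset : List (List Int)) (moves : List (List Int)) (direction : List Int) (passiveEntityLimit : Int) : List (List (List Int)) :=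
  match pvALoop direction moves.reverse ⟨objectset, PySem.Dict.empty, pvSetEmpty⟩ with
  | none => []
  | some st =>
    let M := (pvSetItems st.starters).foldl
      (fun M E =>
        if (st.nex.get? E).isSome then M ++ [pvChainA st.nex (st.nex.size + 1) (some E)]
        else M) []
    if passiveEntityLimit = -1 then M
    else
      M.foldl (fun M2 L =>
        let last := L.getLast?.getD []          -- L.pop(); every chain is nonempty
        let body := L.dropLast
        let p := body.foldl (fun (p : List (List Int) × Int) e =>
            let cnt : Int := if moves.contains e then 0 else p.2 + 1   -- `e in active`, active = set(moves)
            if cnt > passiveEntityLimit then ([], cnt) else (p.1 ++ [e], cnt)) ([], 0)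
        if p.1 ≠ [] then M2 ++ [p.1 ++ [last]] else M2) []

-- ===== PORT B =====
-- B's inner `while True` walk along one chain; none = the raise (excluded by Pre_)
def pvWalk (dir : List Int) (E : List Int) (st : PvSt) : Option PvSt :=
  if E.length ≠ dir.length then none
  else if st.objs.contains E then
    let F := List.zipWith (· + ·) E dir
    pvWalk dir F ⟨st.objs.erase E, st.nex.insert E F, pvSetToggle (pvSetToggle st.starters E) F⟩
  else some st
termination_by st.objs.length
decreasing_by
  have : (st.objs.erase E).length = st.objs.length - 1 :=
    List.length_erase_of_mem (by simpa using ‹st.objs.contains E = true›)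
  have h2 : 0 < st.objs.length :=
    List.length_pos_of_mem (show E ∈ st.objs by simpa using ‹st.objs.contains E = true›)
  omega

-- `for E in reversed(moves): …` — later moves are walked first
def pvBLoop (dir : List Int) : List (List Int) → PvSt → Option PvSt
  | [], st => some st
  | m :: rest, st =>
    match pvBLoop dir rest st with
    | none => none
    | some st' => pvWalk dir m st'

-- B's chain: `L = [E]; while L[-1] in nex: L.append(nex[L[-1]])`; fuel = totality guard
def pvChainB (nex : PySem.Dict (List Int) (List Int)) : Nat → List Int → List (List Int)
  | 0, E => [E]
  | fuel + 1, E =>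
    match nex.get? E with
    | none => [E]
    | some G => E :: pvChainB nex fuel G

def T_generate_links_alt (objectset : List (List Int)) (moves : List (List Int)) (direction : List Int) (passiveEntityLimit : Int) : List (List (List Int)) :=
  match pvBLoop direction moves ⟨objectset, PySem.Dict.empty, pvSetEmpty⟩ with
  | none => []
  | some st =>
    (pvSetItems st.starters).foldl
      (fun M2 E =>
        if (st.nex.get? E).isSome then
          let L := pvChainB st.nex st.nex.size E
          if passiveEntityLimit = -1 then M2 ++ [L]
          else
            let body := L.dropLast
            -- `for i, e in enumerate(body)` carrying (i, cut, run)
            let q := body.foldl (fun (q : Nat × Nat × Int) e =>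
                let run : Int := if moves.contains e then 0 else q.2.2 + 1
                (q.1 + 1, if run > passiveEntityLimit then q.1 + 1 else q.2.1, run)) (0, 0, 0)
            if q.2.1 < body.length then M2 ++ [body.drop q.2.1 ++ [L.getLast?.getD []]] else M2
        else M2) []

-- ===== PRECONDITION & SPEC =====
-- Pre_ excludes exactly the inputs on which A raises its "Bad length" Exception:
-- some element of `moves` has a different length than `direction`.
def Pre_T_generate_links (objectset : List (List Int)) (moves : List (List Int)) (direction : List Int) (passiveEntityLimit : Int) : Prop :=
  ∀ E ∈ moves, E.length = direction.length
instance (objectset : List (List Int)) (moves : List (List Int)) (direction : List Int) (passiveEntityLimit : Int) : Decidable (Pre_T_generate_links objectset moves direction passiveEntityLimit) := by unfold Pre_T_generate_links; infer_instance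

def pvWitness_T_generate_links : List (List Int) × List (List Int) × List Int × Int :=
  ([[0, 0], [1, 0], [2, 0], [5, 5]], [[0, 0]], [1, 0], 1)

def Spec_T_generate_links (objectset : List (List Int)) (moves : List (List Int)) (direction : List Int) (passiveEntityLimit : Int) (out : List (List (List Int))) : Prop := out = T_generate_links_alt objectset moves direction passiveEntityLimit
instance (objectset : List (List Int)) (moves : List (List Int)) (direction : List Int) (passiveEntityLimit : Int) (out : List (List (List Int))) : Decidable (Spec_T_generate_links objectset moves direction passiveEntityLimit out) := by unfold Spec_T_generate_links; infer_instance

-- ===== CLAIM (what is proved, stated in full; the proofs are below) =====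
def Claim_equal_T_generate_links : Prop := ∀ (objectset : List (List Int)) (moves : List (List Int)) (direction : List Int) (passiveEntityLimit : Int), Dom_T_generate_links objectset moves direction passiveEntityLimit → Pre_T_generate_links objectset moves direction passiveEntityLimit → Spec_T_generate_links objectset moves direction passiveEntityLimit (T_generate_links objectset moves direction passiveEntityLimit)

-- ===== LEMMAS AND PROOFS =====

theorem pv_toper_eq_zipWith (T1 T2 : List Int) (h : T1.length = T2.length) :
    pvToper T1 T2 = List.zipWith (· + ·) T1 T2 := by
  apply List.ext_getElem
  · simp [pvToper, h]
  · intro i h1 h2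
    simp only [pvToper, List.length_map, List.length_range] at h1
    simp only [pvToper, List.getElem_map, List.getElem_range, List.getElem_zipWith]
    rw [List.getD_eq_getElem _ _ (by omega), List.getD_eq_getElem _ _ (by omega)]

theorem pv_aloop_cons_aux : ∀ (n : Nat) (st : PvSt) (dir E : List Int) (rest : List (List Int)),
    st.objs.length ≤ n →
    pvALoop dir (E :: rest) st =
      match pvWalk dir E st with
      | none => none
      | some st' => pvALoop dir rest st' := by
  intro n
  induction n with
  | zero =>
    intro st dir E rest h
    have hnil : st.objs = [] := List.eq_nil_of_length_eq_zero (by omega)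
    rw [pvALoop, pvWalk]
    by_cases hl : E.length = dir.length <;> simp [hnil, hl]
  | succ n ih =>
    intro st dir E rest h
    rw [pvALoop, pvWalk]
    by_cases hl : E.length = dir.length
    · by_cases hm : E ∈ st.objs
      · have hlen : (st.objs.erase E).length ≤ n := by
          rw [List.length_erase_of_mem hm]
          have := List.length_pos_of_mem hm
          omega
        simp only [hl, hm, ne_eq, not_true_eq_false, if_false, if_pos,
          List.contains_eq_mem, decide_true]
        rw [pv_toper_eq_zipWith _ _ hl]
        exact ih _ _ _ _ hlen
      · simp [hl, hm]
    · simp [hl]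

theorem pv_aloop_cons (dir : List Int) (E : List Int) (rest : List (List Int)) (st : PvSt) :
    pvALoop dir (E :: rest) st =
      match pvWalk dir E st with
      | none => none
      | some st' => pvALoop dir rest st' :=
  pv_aloop_cons_aux st.objs.length st dir E rest le_rfl

theorem pv_aloop_append_single (dir : List Int) (xs : List (List Int)) (m : List Int) (st : PvSt) :
    pvALoop dir (xs ++ [m]) st = (pvALoop dir xs st).bind (fun st' => pvWalk dir m st') := by
  induction xs generalizing st with
  | nil =>
    rw [List.nil_append, pv_aloop_cons]
    cases h : pvWalk dir m st <;> simp [h, pvALoop]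
  | cons x xs ih =>
    rw [List.cons_append, pv_aloop_cons, pv_aloop_cons]
    cases pvWalk dir x st with
    | none => simp
    | some st' => exact ih st'

theorem pv_bloop_eq_aloop (dir : List Int) (moves : List (List Int)) (st : PvSt) :
    pvBLoop dir moves st = pvALoop dir moves.reverse st := by
  induction moves generalizing st with
  | nil => simp [pvBLoop, pvALoop]
  | cons m rest ih =>
    rw [List.reverse_cons, pv_aloop_append_single, pvBLoop, ih]
    cases pvALoop dir rest.reverse st <;> simp [Option.bind]

theorem pv_chain_eq (nex : PySem.Dict (List Int) (List Int)) (fuel : Nat) (E : List Int) :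
    pvChainA nex (fuel + 1) (some E) = pvChainB nex fuel E := by
  induction fuel generalizing E with
  | zero =>
    rw [pvChainA, pvChainB]
    cases nex.get? E <;> simp [pvChainA]
  | succ f ih =>
    rw [pvChainA, pvChainB]
    cases nex.get? E with
    | none => simp [pvChainA]
    | some G => simp [ih G]

theorem pv_fold_fusion {α : Type} (cond : List Int → Bool) (chain : List Int → List (List Int))
    (f : α → List (List Int) → α) :
    ∀ (items : List (List Int)) (acc : List (List (List Int))) (z : α),
    (items.foldl (fun M E => if cond E then M ++ [chain E] else M) acc).foldl f z =
      items.foldl (fun z E => if cond E then f z (chain E) else z) (acc.foldl f z) := by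
  intro items
  induction items with
  | nil => intro acc z; rfl
  | cons E items ih =>
    intro acc z
    simp only [List.foldl_cons]
    by_cases hc : cond E
    · rw [if_pos hc, if_pos hc, ih, List.foldl_append]
      rfl
    · rw [if_neg hc, if_neg hc, ih]

-- proof-only names for the two filter-loop bodies (definitionally the ports' lambdas)
def pvAStep (lim : Int) (act : List (List Int)) (p : List (List Int) × Int) (e : List Int) :
    List (List Int) × Int :=
  let cnt : Int := if act.contains e then 0 else p.2 + 1
  if cnt > lim then ([], cnt) else (p.1 ++ [e], cnt)

def pvBStep (lim : Int) (act : List (List Int)) (q : Nat × Nat × Int) (e : List Int) :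
    Nat × Nat × Int :=
  let run : Int := if act.contains e then 0 else q.2.2 + 1
  (q.1 + 1, if run > lim then q.1 + 1 else q.2.1, run)

theorem pvAStep_pos {lim : Int} {act : List (List Int)} {p : List (List Int) × Int} {e : List Int}
    (h : (if act.contains e then (0 : Int) else p.2 + 1) > lim) :
    pvAStep lim act p e = ([], if act.contains e then (0 : Int) else p.2 + 1) := by
  simp only [pvAStep]; rw [if_pos h]

theorem pvAStep_neg {lim : Int} {act : List (List Int)} {p : List (List Int) × Int} {e : List Int}
    (h : ¬ (if act.contains e then (0 : Int) else p.2 + 1) > lim) :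
    pvAStep lim act p e = (p.1 ++ [e], if act.contains e then (0 : Int) else p.2 + 1) := by
  simp only [pvAStep]; rw [if_neg h]

theorem pvBStep_pos {lim : Int} {act : List (List Int)} {q : Nat × Nat × Int} {e : List Int}
    (h : (if act.contains e then (0 : Int) else q.2.2 + 1) > lim) :
    pvBStep lim act q e = (q.1 + 1, q.1 + 1, if act.contains e then (0 : Int) else q.2.2 + 1) := by
  simp only [pvBStep]; rw [if_pos h]

theorem pvBStep_neg {lim : Int} {act : List (List Int)} {q : Nat × Nat × Int} {e : List Int}
    (h : ¬ (if act.contains e then (0 : Int) else q.2.2 + 1) > lim) :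
    pvBStep lim act q e = (q.1 + 1, q.2.1, if act.contains e then (0 : Int) else q.2.2 + 1) := by
  simp only [pvBStep]; rw [if_neg h]

theorem pv_filter_aux (lim : Int) (act : List (List Int)) :
    ∀ (xs acc : List (List Int)) (cnt : Int) (i cut : Nat), cut ≤ i →
    (xs.foldl (pvAStep lim act) (acc, cnt)).2 = (xs.foldl (pvBStep lim act) (i, cut, cnt)).2.2 ∧
    (xs.foldl (pvBStep lim act) (i, cut, cnt)).2.1 ≤ i + xs.length ∧
    ((xs.foldl (pvBStep lim act) (i, cut, cnt)).2.1 = cut ∨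
      i + 1 ≤ (xs.foldl (pvBStep lim act) (i, cut, cnt)).2.1) ∧
    (xs.foldl (pvAStep lim act) (acc, cnt)).1 =
      (if (xs.foldl (pvBStep lim act) (i, cut, cnt)).2.1 ≤ i then acc ++ xs
       else xs.drop ((xs.foldl (pvBStep lim act) (i, cut, cnt)).2.1 - i)) := by
  intro xs
  induction xs with
  | nil =>
    intro acc cnt i cut hci
    exact ⟨rfl, by simp; omega, Or.inl rfl, by simp [hci]⟩
  | cons e xs ih =>
    intro acc cnt i cut hci
    simp only [List.foldl_cons, List.length_cons]
    by_cases hv : (if act.contains e then (0 : Int) else cnt + 1) > lim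
    · rw [pvAStep_pos hv, pvBStep_pos hv]
      obtain ⟨ih1, ih2, ih3, ih4⟩ :=
        ih [] (if act.contains e then (0 : Int) else cnt + 1) (i + 1) (i + 1) le_rfl
      set K := (xs.foldl (pvBStep lim act)
        (i + 1, i + 1, if act.contains e then (0 : Int) else cnt + 1)).2.1 with hKdef
      have hK1 : i + 1 ≤ K := by rcases ih3 with h | h <;> omega
      refine ⟨ih1, by omega, Or.inr (by omega), ?_⟩
      by_cases hK : K ≤ i + 1
      · rw [ih4, if_pos hK, if_neg (show ¬ K ≤ i by omega)]
        have h1 : K - i = 1 := by omega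
        rw [h1, List.drop_succ_cons, List.drop_zero, List.nil_append]
      · rw [ih4, if_neg hK, if_neg (show ¬ K ≤ i by omega)]
        have h1 : K - i = (K - (i + 1)) + 1 := by omega
        rw [h1, List.drop_succ_cons]
    · rw [pvAStep_neg hv, pvBStep_neg hv]
      obtain ⟨ih1, ih2, ih3, ih4⟩ :=
        ih (acc ++ [e]) (if act.contains e then (0 : Int) else cnt + 1) (i + 1) cut (by omega)
      set K := (xs.foldl (pvBStep lim act)
        (i + 1, cut, if act.contains e then (0 : Int) else cnt + 1)).2.1 with hKdef
      refine ⟨ih1, by omega, by rcases ih3 with h | h <;> omega, ?_⟩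
      rcases ih3 with h | h
      · rw [ih4, if_pos (show K ≤ i + 1 by omega), if_pos (show K ≤ i by omega),
          List.append_assoc, List.singleton_append]
      · rw [ih4, if_neg (show ¬ K ≤ i + 1 by omega), if_neg (show ¬ K ≤ i by omega)]
        have h1 : K - i = (K - (i + 1)) + 1 := by omega
        rw [h1, List.drop_succ_cons]

theorem pv_perchain (lim : Int) (act : List (List Int)) (L : List (List Int))
    (z : List (List (List Int))) :
    (if (L.dropLast.foldl (pvAStep lim act) ([], 0)).1 ≠ [] then
        z ++ [(L.dropLast.foldl (pvAStep lim act) ([], 0)).1 ++ [L.getLast?.getD []]]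
      else z) =
    (if (L.dropLast.foldl (pvBStep lim act) (0, 0, 0)).2.1 < L.dropLast.length then
        z ++ [L.dropLast.drop (L.dropLast.foldl (pvBStep lim act) (0, 0, 0)).2.1 ++
          [L.getLast?.getD []]]
      else z) := by
  obtain ⟨h1, h2, h3, h4⟩ := pv_filter_aux lim act L.dropLast [] 0 0 0 le_rfl
  set K := (L.dropLast.foldl (pvBStep lim act) (0, 0, 0)).2.1 with hK
  have hp : (L.dropLast.foldl (pvAStep lim act) ([], 0)).1 = L.dropLast.drop K := by
    rw [h4]
    by_cases h : K ≤ 0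
    · rw [if_pos h, List.nil_append]
      have h0 : K = 0 := by omega
      rw [h0, List.drop_zero]
    · rw [if_neg h, Nat.sub_zero]
  rw [hp]
  have hnil : (L.dropLast.drop K = []) ↔ L.dropLast.length ≤ K := List.drop_eq_nil_iff
  by_cases h : K < L.dropLast.length
  · rw [if_pos (show L.dropLast.drop K ≠ [] from by rw [ne_eq, hnil]; omega), if_pos h]
  · rw [if_neg (show ¬ L.dropLast.drop K ≠ [] from by rw [ne_eq, not_not, hnil]; omega), if_neg h]

theorem pv_ports_eq (objectset : List (List Int)) (moves : List (List Int))
    (direction : List Int) (passiveEntityLimit : Int) :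
    T_generate_links objectset moves direction passiveEntityLimit =
      T_generate_links_alt objectset moves direction passiveEntityLimit := by
  unfold T_generate_links T_generate_links_alt
  rw [pv_bloop_eq_aloop]
  cases h : pvALoop direction moves.reverse ⟨objectset, PySem.Dict.empty, pvSetEmpty⟩ with
  | none => rfl
  | some st =>
    have ha : (fun (p : List (List Int) × Int) e =>
        let cnt : Int := if moves.contains e then 0 else p.2 + 1
        if cnt > passiveEntityLimit then ([], cnt) else (p.1 ++ [e], cnt)) =
        pvAStep passiveEntityLimit moves := rfl
    have hb : (fun (q : Nat × Nat × Int) e =>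
        let run : Int := if moves.contains e then 0 else q.2.2 + 1
        (q.1 + 1, if run > passiveEntityLimit then q.1 + 1 else q.2.1, run)) =
        pvBStep passiveEntityLimit moves := rfl
    simp only [← pv_chain_eq, ha, hb]
    by_cases hlim : passiveEntityLimit = -1
    · simp [hlim]
    · rw [if_neg hlim]
      simp only [hlim, ite_false]
      rw [pv_fold_fusion (fun E => (st.nex.get? E).isSome)
          (fun E => pvChainA st.nex (st.nex.size + 1) (some E))
          (fun M2 L =>
            if (List.foldl (pvAStep passiveEntityLimit moves) ([], 0) L.dropLast).1 ≠ [] then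
              M2 ++ [(List.foldl (pvAStep passiveEntityLimit moves) ([], 0) L.dropLast).1 ++
                [L.getLast?.getD []]]
            else M2)]
      apply PySem.List.foldl_congr_mem
      intro z E _
      by_cases hc : (st.nex.get? E).isSome
      · rw [if_pos hc, if_pos hc]
        exact pv_perchain passiveEntityLimit moves (pvChainA st.nex (st.nex.size + 1) (some E)) z
      · rw [if_neg hc, if_neg hc]

-- ===== VERDICT (by name: the statement is the Claim_ definition above) =====
theorem T_generate_links_spec : Claim_equal_T_generate_links := by
  intro objectset moves direction passiveEntityLimit _ _
  unfold Spec_T_generate_links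
  exact pv_ports_eq objectset moves direction passiveEntityLimit
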